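-- pv_equiv track=rewrite | github.com/ze-bang/exact_diagonalization_cpp | python/edlib/automorphism_finder.py | do_permutations_commute
-- ===== SOURCE A (Python) =====
-- def do_permutations_commute(perm1, perm2):
--     """Check if two permutations commute - optimized version"""
--     # Quick checks first
--     if perm1 is perm2:
--         return True
--     if len(perm1) != len(perm2):
--         return False
--
--     # Early exit optimization: check if they commute by testing composition
--     # Only check positions that differ from identity or are affected by either permutation
--     n = len(perm1)
--
--     # Find positions affected by each permutation
--     affected1 = {i for i in range(n) if perm1[i] != i}
--     affected2 = {i for i in range(n) if perm2[i] != i}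
--
--     # If they affect disjoint sets of positions, they commute
--     if affected1.isdisjoint(affected2):
--         return True
--
--     # Check commutation only at affected positions
--     check_positions = affected1 | affected2
--     for i in check_positions:
--         if perm1[perm2[i]] != perm2[perm1[i]]:
--             return False
--
--     return True
-- ===== SOURCE B (Python) =====
-- def do_permutations_commute(perm1, perm2):
--     """p and q commute iff the conjugate q*p*q^-1 equals p: build that
--     conjugate in one scatter pass over q and compare it with p."""
--     if len(perm1) != len(perm2):
--         return False
--     conj = [0] * len(perm2)
--     for i, v in enumerate(perm2):
--         conj[v] = perm2[perm1[i]]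
--     return conj == perm1
-- ===== Notes on version B (the rewrite author's own statement) =====
-- stated objective: alternative
-- what changed: B replaces A's affected-position sets, disjointness shortcut and union loop by the group-theoretic criterion p*q = q*p iff q*p*q^-1 = p: it builds the conjugate permutation in one scatter pass over perm2 and compares that list with perm1.
-- outside the precondition, e.g. on do_permutations_commute([0, 0], [1, 1]): A returns True, B returns False; on do_permutations_commute([5, 0], [0, 1]): A returns True, B raises IndexError
import Mathlib
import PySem

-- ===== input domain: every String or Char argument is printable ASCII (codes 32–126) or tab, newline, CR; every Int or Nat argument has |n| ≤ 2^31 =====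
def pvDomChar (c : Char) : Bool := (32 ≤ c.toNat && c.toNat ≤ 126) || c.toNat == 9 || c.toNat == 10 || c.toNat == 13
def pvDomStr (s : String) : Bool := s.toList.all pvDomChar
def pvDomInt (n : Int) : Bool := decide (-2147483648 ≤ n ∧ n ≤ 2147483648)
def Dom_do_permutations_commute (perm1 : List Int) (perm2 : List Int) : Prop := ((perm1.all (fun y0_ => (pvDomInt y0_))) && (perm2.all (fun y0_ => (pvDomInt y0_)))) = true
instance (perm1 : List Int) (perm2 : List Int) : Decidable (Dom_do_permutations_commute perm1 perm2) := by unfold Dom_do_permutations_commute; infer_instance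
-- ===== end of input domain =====

-- B replaces A's affected-position sets / disjointness shortcut / union loop by the criterion
-- "p and q commute iff the conjugate q·p·q⁻¹ equals p", built in one scatter pass (objective: alternative).

-- ===== PORT A =====
-- `perm1 is perm2` (object identity) is ported as list equality; inside Pre_ this is faithful:
-- on equal lists the fall-through computation also returns True.
-- xs[i] is ported as the total PySem.List.pyGetD xs i 0: under Pre_ every index reached is in range.
def do_permutations_commute (perm1 : List Int) (perm2 : List Int) : Bool :=
  if perm1 = perm2 then true
  else if perm1.length ≠ perm2.length then false
  else
    let n : Int := (perm1.length : Int)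
    let affected1 : PySem.Set Int :=
      PySem.Set.ofList ((PySem.List.pyRange 0 n 1).filter
        (fun i => PySem.List.pyGetD perm1 i 0 != i))
    let affected2 : PySem.Set Int :=
      PySem.Set.ofList ((PySem.List.pyRange 0 n 1).filter
        (fun i => PySem.List.pyGetD perm2 i 0 != i))
    if PySem.Set.isdisjoint affected1 affected2 then true
    else
      let check_positions : PySem.Set Int := PySem.Set.union affected1 affected2
      -- `for i in check_positions: if …: return False` / `return True` — order-independent all
      check_positions.all (fun i =>
        PySem.List.pyGetD perm1 (PySem.List.pyGetD perm2 i 0) 0 ==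
        PySem.List.pyGetD perm2 (PySem.List.pyGetD perm1 i 0) 0)

-- ===== PORT B =====
-- conj[v] = … is ported as the total PySem.List.pySetD: under Pre_ v is always in range.
def do_permutations_commute_alt (perm1 : List Int) (perm2 : List Int) : Bool :=
  if perm1.length ≠ perm2.length then false
  else
    let conj : List Int :=
      (PySem.List.enumerate perm2 0).foldl
        (fun c iv =>
          PySem.List.pySetD c iv.2
            (PySem.List.pyGetD perm2 (PySem.List.pyGetD perm1 iv.1 0) 0))
        (List.replicate perm2.length 0)
    conj == perm1

-- ===== PRECONDITION & SPEC =====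
-- Pre_ admits length-mismatched pairs and genuine permutations of 0..n-1; it excludes equal-length
-- non-permutation inputs, where out-of-range entries make A raise IndexError (except through its
-- identity/disjointness shortcuts, see cites) and where A's disjoint-affected-sets shortcut (sound
-- only for bijections) and Python's negative-index wraparound give accidental values that no caller
-- of a permutation predicate would specify.
def Pre_do_permutations_commute (perm1 : List Int) (perm2 : List Int) : Prop :=
  perm1.length ≠ perm2.length ∨
  ((∀ x ∈ perm1, 0 ≤ x ∧ x < (perm1.length : Int)) ∧ perm1.Nodup ∧
   (∀ x ∈ perm2, 0 ≤ x ∧ x < (perm2.length : Int)) ∧ perm2.Nodup)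
instance (perm1 : List Int) (perm2 : List Int) : Decidable (Pre_do_permutations_commute perm1 perm2) := by unfold Pre_do_permutations_commute; infer_instance

def pvWitness_do_permutations_commute : List Int × List Int := ([1, 0], [0, 1])

def Spec_do_permutations_commute (perm1 : List Int) (perm2 : List Int) (out : Bool) : Prop := out = do_permutations_commute_alt perm1 perm2
instance (perm1 : List Int) (perm2 : List Int) (out : Bool) : Decidable (Spec_do_permutations_commute perm1 perm2 out) := by unfold Spec_do_permutations_commute; infer_instance

-- ===== CLAIM =====
def Claim_equal_do_permutations_commute : Prop := ∀ (perm1 : List Int) (perm2 : List Int), Dom_do_permutations_commute perm1 perm2 → Pre_do_permutations_commute perm1 perm2 → Spec_do_permutations_commute perm1 perm2 (do_permutations_commute perm1 perm2)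

-- ===== LEMMAS AND PROOFS =====

-- pointwise commutation over getD: what both ports' results are characterised by
def pvCommutes (p1 p2 : List Int) : Prop :=
  ∀ i < p1.length, p1.getD (p2.getD i 0).toNat 0 = p2.getD (p1.getD i 0).toNat 0

-- proof-side names for the expressions inside the two ports
def pvAff (p : List Int) (n : Int) : PySem.Set Int :=
  PySem.Set.ofList ((PySem.List.pyRange 0 n 1).filter
    (fun i => PySem.List.pyGetD p i 0 != i))

def pvOk (p1 p2 : List Int) (x : Int) : Bool :=
  PySem.List.pyGetD p1 (PySem.List.pyGetD p2 x 0) 0 ==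
  PySem.List.pyGetD p2 (PySem.List.pyGetD p1 x 0) 0

def pvConj (p1 p2 : List Int) : List Int :=
  (PySem.List.enumerate p2 0).foldl
    (fun c iv =>
      PySem.List.pySetD c iv.2
        (PySem.List.pyGetD p2 (PySem.List.pyGetD p1 iv.1 0) 0))
    (List.replicate p2.length 0)

-- basic getD facts
theorem pv_getD_mem (p : List Int) (i : Nat) (hi : i < p.length) : p.getD i 0 ∈ p := by
  rw [List.getD_eq_getElem p 0 hi]; exact List.getElem_mem _

theorem pv_getD_inj (p : List Int) (hn : p.Nodup) {i j : Nat}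
    (hi : i < p.length) (hj : j < p.length) (h : p.getD i 0 = p.getD j 0) : i = j := by
  rw [List.getD_eq_getElem p 0 hi, List.getD_eq_getElem p 0 hj] at h
  exact (List.Nodup.getElem_inj_iff hn).mp h

theorem pv_surj (p : List Int) (hb : ∀ x ∈ p, 0 ≤ x ∧ x < (p.length : Int)) (hn : p.Nodup)
    (j : Nat) (hj : j < p.length) : ∃ k, k < p.length ∧ p.getD k 0 = (j : Int) := by
  have hperm : p.Perm ((List.range p.length).map (fun k : Nat => (k : Int))) := by
    apply List.Subperm.perm_of_length_le
    · apply List.subperm_of_subset hn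
      intro x hx
      rcases hb x hx with ⟨h0, h1⟩
      have hx' : x = ((x.toNat : Nat) : Int) := by omega
      rw [hx']
      exact List.mem_map_of_mem (List.mem_range.mpr (by omega))
    · simp
  have hmem : (j : Int) ∈ p :=
    hperm.mem_iff.mpr (List.mem_map_of_mem (List.mem_range.mpr hj))
  obtain ⟨k, hk, he⟩ := List.mem_iff_getElem.mp hmem
  exact ⟨k, hk, by rw [List.getD_eq_getElem p 0 hk]; exact he⟩

theorem pv_getD_int (p : List Int) (x : Int) (h0 : 0 ≤ x) (h1 : x < (p.length : Int)) :
    PySem.List.pyGetD p x 0 = p.getD x.toNat 0 := by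
  rw [PySem.List.pyGetD_eq_getElem p 0 h0 h1, List.getD_eq_getElem p 0 (by omega)]

-- characterisation of A's affected sets
theorem pv_mem_aff (p : List Int) (n x : Int) :
    x ∈ pvAff p n ↔ (0 ≤ x ∧ x < n) ∧ PySem.List.pyGetD p x 0 ≠ x := by
  rw [pvAff, PySem.Set.mem_ofList, List.mem_filter, PySem.List.mem_pyRange_one]
  simp [bne_iff_ne, and_comm]

-- A with both quick exits removed (shape of the fall-through branch)
theorem pvA_eq (p1 p2 : List Int) (hpp : p1 ≠ p2) (hlen : p1.length = p2.length) :
    do_permutations_commute p1 p2 =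
      (if PySem.Set.isdisjoint (pvAff p1 (p1.length : Int)) (pvAff p2 (p1.length : Int)) then true
       else (PySem.Set.union (pvAff p1 (p1.length : Int)) (pvAff p2 (p1.length : Int))).all
              (pvOk p1 p2)) := by
  unfold do_permutations_commute
  rw [if_neg hpp, if_neg (show ¬(p1.length ≠ p2.length) from by simp [hlen])]
  rfl

-- the loop test at a natural position is pointwise commutation there
theorem pv_ok_iff (p1 p2 : List Int) (hlen : p1.length = p2.length)
    (hb1 : ∀ x ∈ p1, 0 ≤ x ∧ x < (p1.length : Int))
    (hb2 : ∀ x ∈ p2, 0 ≤ x ∧ x < (p2.length : Int))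
    (i : Nat) (hi : i < p1.length) :
    pvOk p1 p2 (i : Int) = true ↔
      p1.getD (p2.getD i 0).toNat 0 = p2.getD (p1.getD i 0).toNat 0 := by
  have h2 := hb2 _ (pv_getD_mem p2 i (by omega))
  have h1 := hb1 _ (pv_getD_mem p1 i hi)
  rw [pvOk, PySem.List.pyGetD_natCast, PySem.List.pyGetD_natCast,
      pv_getD_int p1 _ h2.1 (by omega), pv_getD_int p2 _ h1.1 (by omega), beq_iff_eq]

-- support of an injective in-range list is closed under the map
theorem pv_supp_closed (p : List Int) (hn : p.Nodup)
    (hb : ∀ x ∈ p, 0 ≤ x ∧ x < (p.length : Int))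
    (i : Nat) (hi : i < p.length) (hne : p.getD i 0 ≠ (i : Int)) :
    p.getD (p.getD i 0).toNat 0 ≠ p.getD i 0 := by
  intro h
  rcases hb _ (pv_getD_mem p i hi) with ⟨h0, h1⟩
  have := pv_getD_inj p hn (i := (p.getD i 0).toNat) (j := i) (by omega) hi h
  omega

-- disjoint supports commute (needs injectivity: this is where being a permutation matters)
theorem pv_disjoint_commutes (p1 p2 : List Int) (hlen : p1.length = p2.length)
    (hb1 : ∀ x ∈ p1, 0 ≤ x ∧ x < (p1.length : Int)) (hn1 : p1.Nodup)
    (hb2 : ∀ x ∈ p2, 0 ≤ x ∧ x < (p2.length : Int)) (hn2 : p2.Nodup)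
    (hfix : ∀ i < p1.length, p1.getD i 0 = (i : Int) ∨ p2.getD i 0 = (i : Int)) :
    pvCommutes p1 p2 := by
  intro i hi
  rcases hb1 _ (pv_getD_mem p1 i hi) with ⟨ha0, ha1⟩
  rcases hb2 _ (pv_getD_mem p2 i (by omega)) with ⟨hb0, hb1'⟩
  rcases hfix i hi with h1 | h2
  · -- p1 fixes i
    by_cases hbi : p2.getD i 0 = (i : Int)
    · rw [h1, hbi]
      simp only [Int.toNat_natCast]
      rw [h1, hbi]
    · have hcl : p2.getD (p2.getD i 0).toNat 0 ≠ p2.getD i 0 :=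
        pv_supp_closed p2 hn2 hb2 i (by omega) hbi
      rcases hfix (p2.getD i 0).toNat (by omega) with h | h
      · rw [h1, Int.toNat_natCast, h]
        omega
      · exact absurd (by rw [h]; omega) hcl
  · -- p2 fixes i
    by_cases hai : p1.getD i 0 = (i : Int)
    · rw [h2, hai]
      simp only [Int.toNat_natCast]
      rw [h2, hai]
    · have hcl : p1.getD (p1.getD i 0).toNat 0 ≠ p1.getD i 0 :=
        pv_supp_closed p1 hn1 hb1 i hi hai
      rcases hfix (p1.getD i 0).toNat (by omega) with h | h
      · exact absurd (by rw [h]; omega) hcl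
      · rw [h2, Int.toNat_natCast, h]
        omega

-- A returns true iff the permutations commute pointwise
theorem pvA_iff (p1 p2 : List Int) (hlen : p1.length = p2.length)
    (hb1 : ∀ x ∈ p1, 0 ≤ x ∧ x < (p1.length : Int)) (hn1 : p1.Nodup)
    (hb2 : ∀ x ∈ p2, 0 ≤ x ∧ x < (p2.length : Int)) (hn2 : p2.Nodup) :
    do_permutations_commute p1 p2 = true ↔ pvCommutes p1 p2 := by
  by_cases hpp : p1 = p2
  · subst hpp
    refine iff_of_true ?_ (fun i _ => rfl)
    unfold do_permutations_commute
    rw [if_pos rfl]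
  · rw [pvA_eq p1 p2 hpp hlen]
    by_cases hdis :
        PySem.Set.isdisjoint (pvAff p1 (p1.length : Int)) (pvAff p2 (p1.length : Int)) = true
    · rw [if_pos hdis]
      refine iff_of_true rfl ?_
      refine pv_disjoint_commutes p1 p2 hlen hb1 hn1 hb2 hn2 ?_
      intro i hi
      by_contra hcon
      push Not at hcon
      have h1 : (i : Int) ∈ pvAff p1 (p1.length : Int) :=
        (pv_mem_aff p1 _ _).mpr ⟨⟨by positivity, by exact_mod_cast hi⟩,
          by rw [PySem.List.pyGetD_natCast]; exact hcon.1⟩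
      have h2 : (i : Int) ∈ pvAff p2 (p1.length : Int) :=
        (pv_mem_aff p2 _ _).mpr ⟨⟨by positivity, by exact_mod_cast hi⟩,
          by rw [PySem.List.pyGetD_natCast]; exact hcon.2⟩
      exact (PySem.Set.isdisjoint_iff _ _).mp hdis _ h1 h2
    · rw [if_neg hdis, List.all_eq_true]
      constructor
      · intro h i hi
        refine (pv_ok_iff p1 p2 hlen hb1 hb2 i hi).mp ?_
        by_cases hm1 : PySem.List.pyGetD p1 (i : Int) 0 = (i : Int)
        · by_cases hm2 : PySem.List.pyGetD p2 (i : Int) 0 = (i : Int)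
          · simp [pvOk, hm1, hm2]
          · exact h _ ((PySem.Set.mem_union _ _ _).mpr (Or.inr ((pv_mem_aff p2 _ _).mpr
              ⟨⟨by positivity, by exact_mod_cast hi⟩, hm2⟩)))
        · exact h _ ((PySem.Set.mem_union _ _ _).mpr (Or.inl ((pv_mem_aff p1 _ _).mpr
            ⟨⟨by positivity, by exact_mod_cast hi⟩, hm1⟩)))
      · intro h x hx
        have hx' : 0 ≤ x ∧ x < (p1.length : Int) := by
          rcases (PySem.Set.mem_union _ _ _).mp hx with hx1 | hx1
          · exact ((pv_mem_aff p1 _ _).mp hx1).1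
          · exact ((pv_mem_aff p2 _ _).mp hx1).1
        have hxe : x = ((x.toNat : Nat) : Int) := by omega
        rw [hxe]
        exact (pv_ok_iff p1 p2 hlen hb1 hb2 x.toNat (by omega)).mpr (h x.toNat (by omega))

-- the scatter fold keeps the length
theorem pv_foldl_set_length (F : Int → Int) :
    ∀ (l : List (Int × Int)) (c : List Int),
      (l.foldl (fun c iv => PySem.List.pySetD c iv.2 (F iv.1)) c).length = c.length := by
  intro l
  induction l with
  | nil => intro c; rfl
  | cons hd tl ih =>
      intro c
      simp only [List.foldl_cons]
      rw [ih]
      exact PySem.List.length_pySetD c hd.2 (F hd.1)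

-- element j of the scatter fold: the value written by the (unique) pair targeting j, else c's
theorem pv_foldl_set_getD (F : Int → Int) :
    ∀ (l : List (Int × Int)) (c : List Int),
      (∀ iv ∈ l, 0 ≤ iv.2 ∧ iv.2 < (c.length : Int)) →
      (l.map (·.2)).Nodup →
      ∀ j : Nat, j < c.length →
        (l.foldl (fun c iv => PySem.List.pySetD c iv.2 (F iv.1)) c).getD j 0 =
          (match l.find? (fun iv => iv.2.toNat == j) with
           | some iv => F iv.1
           | none => c.getD j 0) := by
  intro l
  induction l with
  | nil => intro c _ _ j hj; rfl
  | cons hd tl ih =>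
      intro c hb hnd j hj
      rcases hb hd List.mem_cons_self with ⟨hv0, hv1⟩
      rw [List.map_cons, List.nodup_cons] at hnd
      have hset : PySem.List.pySetD c hd.2 (F hd.1) = c.set hd.2.toNat (F hd.1) :=
        PySem.List.pySetD_of_nonneg c (F hd.1) hv0
      have hlen' : (c.set hd.2.toNat (F hd.1)).length = c.length := by simp
      have hb' : ∀ iv ∈ tl, 0 ≤ iv.2 ∧ iv.2 < ((c.set hd.2.toNat (F hd.1)).length : Int) := by
        intro iv hiv; rw [hlen']; exact hb iv (List.mem_cons_of_mem _ hiv)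
      simp only [List.foldl_cons]
      rw [hset, ih _ hb' hnd.2 j (by omega)]
      by_cases hpj : hd.2.toNat = j
      · have hfind : tl.find? (fun iv => iv.2.toNat == j) = none := by
          rw [List.find?_eq_none]
          intro iv hiv
          rcases hb iv (List.mem_cons_of_mem _ hiv) with ⟨hw0, _⟩
          have hne : iv.2 ≠ hd.2 := by
            intro he
            exact hnd.1 (he ▸ List.mem_map_of_mem hiv)
          simp only [beq_iff_eq]
          omega
        rw [List.find?_cons_of_pos (by simp [hpj]), hfind]
        rw [List.getD_eq_getElem _ 0 (by omega)]
        have : j < c.length := hj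
        subst hpj
        simp
      · rw [List.find?_cons_of_neg (by simp [hpj])]
        cases hfind : tl.find? (fun iv => iv.2.toNat == j) with
        | some iv => rfl
        | none =>
            simp only []
            rw [List.getD_eq_getElem _ 0 (by omega), List.getD_eq_getElem c 0 hj]
            exact List.getElem_set_ne (by omega) (by omega)

theorem pv_length_conj (p1 p2 : List Int) : (pvConj p1 p2).length = p2.length := by
  rw [pvConj, pv_foldl_set_length
    (fun i => PySem.List.pyGetD p2 (PySem.List.pyGetD p1 i 0) 0), List.length_replicate]

-- element j of the conjugate: q[p1[k]] for some k with q[k] = j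
theorem pv_conj_getD (p1 p2 : List Int) (hlen : p1.length = p2.length)
    (hb1 : ∀ x ∈ p1, 0 ≤ x ∧ x < (p1.length : Int))
    (hb2 : ∀ x ∈ p2, 0 ≤ x ∧ x < (p2.length : Int)) (hn2 : p2.Nodup)
    (j : Nat) (hj : j < p2.length) :
    ∃ k, k < p2.length ∧ p2.getD k 0 = (j : Int) ∧
      (pvConj p1 p2).getD j 0 = p2.getD (p1.getD k 0).toNat 0 := by
  have hbE : ∀ iv ∈ PySem.List.enumerate p2 0,
      0 ≤ iv.2 ∧ iv.2 < ((List.replicate p2.length (0 : Int)).length : Int) := by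
    intro iv hiv
    rw [PySem.List.mem_enumerate_iff] at hiv
    obtain ⟨k, hk, rfl⟩ := hiv
    rw [List.length_replicate]
    exact hb2 _ (List.getElem_mem _)
  have hndE : ((PySem.List.enumerate p2 0).map (·.2)).Nodup := by
    rw [PySem.List.map_snd_enumerate]; exact hn2
  have hmain := pv_foldl_set_getD
    (fun i => PySem.List.pyGetD p2 (PySem.List.pyGetD p1 i 0) 0)
    (PySem.List.enumerate p2 0) (List.replicate p2.length 0) hbE hndE j
    (by rw [List.length_replicate]; exact hj)
  -- find? succeeds: some index of p2 holds j
  obtain ⟨k, hk, hkj⟩ := pv_surj p2 hb2 hn2 j hj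
  have hsome : ((PySem.List.enumerate p2 0).find? (fun iv => iv.2.toNat == j)).isSome := by
    rw [List.find?_isSome]
    refine ⟨((k : Int), p2[k]), ?_, ?_⟩
    · rw [PySem.List.mem_enumerate_iff]
      exact ⟨k, hk, by simp⟩
    · simp only [beq_iff_eq]
      rw [← List.getD_eq_getElem p2 0 hk, hkj]
      exact Int.toNat_natCast j
  obtain ⟨iv, hiv⟩ := Option.isSome_iff_exists.mp hsome
  have hmem := List.mem_of_find?_eq_some hiv
  have hpred := List.find?_some hiv
  rw [PySem.List.mem_enumerate_iff] at hmem
  obtain ⟨k', hk', rfl⟩ := hmem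
  simp only [beq_iff_eq] at hpred
  rcases hb2 _ (List.getElem_mem hk') with ⟨hq0, hq1⟩
  have hkj' : p2.getD k' 0 = (j : Int) := by
    rw [List.getD_eq_getElem p2 0 hk']
    omega
  refine ⟨k', hk', hkj', ?_⟩
  rw [pvConj, hmain, hiv]
  simp only [zero_add]
  rcases hb1 _ (pv_getD_mem p1 k' (by omega)) with ⟨ha0, ha1⟩
  rw [PySem.List.pyGetD_natCast, pv_getD_int p2 _ ha0 (by omega)]

-- B returns true iff the permutations commute pointwise
theorem pvB_iff (p1 p2 : List Int) (hlen : p1.length = p2.length)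
    (hb1 : ∀ x ∈ p1, 0 ≤ x ∧ x < (p1.length : Int))
    (hb2 : ∀ x ∈ p2, 0 ≤ x ∧ x < (p2.length : Int)) (hn2 : p2.Nodup) :
    do_permutations_commute_alt p1 p2 = true ↔ pvCommutes p1 p2 := by
  unfold do_permutations_commute_alt
  rw [if_neg (show ¬(p1.length ≠ p2.length) from by simp [hlen])]
  show (pvConj p1 p2 == p1) = true ↔ _
  rw [beq_iff_eq]
  constructor
  · intro hconj i hi
    rcases hb2 _ (pv_getD_mem p2 i (by omega)) with ⟨hb0, hb1'⟩
    set j : Nat := (p2.getD i 0).toNat with hjdef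
    have hj : j < p2.length := by omega
    obtain ⟨k, hk, hkj, hval⟩ := pv_conj_getD p1 p2 hlen hb1 hb2 hn2 j hj
    have hki : k = i := by
      refine pv_getD_inj p2 hn2 hk (by omega) ?_
      rw [hkj]
      omega
    subst hki
    rw [hconj] at hval
    exact hval
  · intro hcomm
    refine List.ext_getElem (by rw [pv_length_conj, hlen]) ?_
    intro j hj1 hj2
    obtain ⟨k, hk, hkj, hval⟩ := pv_conj_getD p1 p2 hlen hb1 hb2 hn2 j (by rw [pv_length_conj] at hj1; exact hj1)
    have hcomm_k := hcomm k (by omega)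
    rw [hkj] at hcomm_k
    rw [Int.toNat_natCast] at hcomm_k
    rw [← List.getD_eq_getElem (pvConj p1 p2) 0 hj1, ← List.getD_eq_getElem p1 0 hj2,
        hval, ← hcomm_k]

-- ===== VERDICT =====
theorem do_permutations_commute_spec : Claim_equal_do_permutations_commute := by
  intro p1 p2 _ hpre
  unfold Spec_do_permutations_commute
  by_cases hlen : p1.length = p2.length
  · obtain ⟨hb1, hn1, hb2, hn2⟩ :
        (∀ x ∈ p1, 0 ≤ x ∧ x < (p1.length : Int)) ∧ p1.Nodup ∧
        (∀ x ∈ p2, 0 ≤ x ∧ x < (p2.length : Int)) ∧ p2.Nodup := by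
      rcases hpre with h | h
      · exact absurd hlen h
      · exact h
    rw [Bool.eq_iff_iff]
    exact Iff.trans (pvA_iff p1 p2 hlen hb1 hn1 hb2 hn2)
      (pvB_iff p1 p2 hlen hb1 hb2 hn2).symm
  · have hpp : p1 ≠ p2 := by
      intro h; exact hlen (by rw [h])
    unfold do_permutations_commute do_permutations_commute_alt
    rw [if_neg hpp, if_pos hlen, if_pos hlen]
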